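-- pv_equiv track=rewrite | github.com/scipraxian/are-self-api | identity/addons/skills_index_addon.py | _fit_rows_with_cap
-- ===== SOURCE A (Python) =====
-- from typing import Any, Dict, List, Optional
--
-- def _truncate_cell(text: str, max_len: int) -> str:
--     one = (text or '').replace('\n', ' ').strip()
--     if len(one) <= max_len:
--         return one
--     if max_len <= 3:
--         return one[:max_len]
--     return one[: max_len - 3] + '...'
--
-- def _build_table(rows: List[tuple[str, str]]) -> str:
--     header = (
--         '## Available Skills\n\n'
--         '| Skill | Description |\n'
--         '|-------|-------------|\n'
--     )
--     body_lines = [f'| {name} | {desc} |' for name, desc in rows]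
--     return header + '\n'.join(body_lines)
--
-- def _fit_rows_with_cap(
--     rows: List[tuple[str, str]], max_chars: int
-- ) -> tuple[str, int]:
--     """Return rendered table (with optional overflow notice) and omitted row count."""
--     if not rows:
--         return '', 0
--
--     for take in range(len(rows), 0, -1):
--         chunk = rows[:take]
--         omitted = len(rows) - take
--         footer = f'\n\n...and {omitted} more' if omitted else ''
--         candidate = _build_table(chunk) + footer
--         if len(candidate) <= max_chars:
--             return candidate, omitted
--
--     footer_only = f'## Available Skills\n\n...and {len(rows)} more'
--     if len(footer_only) <= max_chars:
--         return footer_only, len(rows)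
--
--     first_name, first_desc = rows[0]
--     tight = ''
--     for cap in (200, 80, 40, 20):
--         tight = _build_table([(first_name, _truncate_cell(first_desc, cap))])
--         if len(tight) <= max_chars:
--             return tight, len(rows) - 1
--     return tight[:max_chars], len(rows) - 1
-- ===== SOURCE B (Python) =====
-- from typing import List
--
-- _HEADER = (
--     '## Available Skills\n\n'
--     '| Skill | Description |\n'
--     '|-------|-------------|\n'
-- )
--
-- def _truncate_cell(text: str, max_len: int) -> str:
--     one = (text or '').replace('\n', ' ').strip()
--     if len(one) <= max_len:
--         return one
--     if max_len <= 3: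
--         return one[:max_len]
--     return one[: max_len - 3] + '...'
--
-- def _build_table(rows: List[tuple[str, str]]) -> str:
--     body_lines = [f'| {name} | {desc} |' for name, desc in rows]
--     return _HEADER + '\n'.join(body_lines)
--
-- def _overflow_fallback(rows: List[tuple[str, str]], max_chars: int) -> tuple[str, int]:
--     footer_only = f'## Available Skills\n\n...and {len(rows)} more'
--     if len(footer_only) <= max_chars:
--         return footer_only, len(rows)
--     first_name, first_desc = rows[0]
--     tight = ''
--     for cap in (200, 80, 40, 20):
--         tight = _build_table([(first_name, _truncate_cell(first_desc, cap))])
--         if len(tight) <= max_chars: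
--             return tight, len(rows) - 1
--     return tight[:max_chars], len(rows) - 1
--
-- def _fit_rows_with_cap(rows: List[tuple[str, str]], max_chars: int) -> tuple[str, int]:
--     """Prefix sums of rendered lengths: O(1) length test per candidate, one render."""
--     if not rows:
--         return '', 0
--     n = len(rows)
--     # table_lens[k-1] == len(_build_table(rows[:k])): start at len(header) - 1,
--     # each row contributes len('| name | desc |') + 1 joining newline = len+8.
--     acc = len(_HEADER) - 1
--     table_lens = []
--     for name, desc in rows:
--         acc += len(name) + len(desc) + 8
--         table_lens.append(acc)
--     omitted = 0
--     for tlen in reversed(table_lens):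
--         extra = 0 if omitted == 0 else 14 + len(str(omitted))
--         if tlen + extra <= max_chars:
--             take = n - omitted
--             footer = f'\n\n...and {omitted} more' if omitted else ''
--             return _build_table(rows[:take]) + footer, omitted
--         omitted += 1
--     return _overflow_fallback(rows, max_chars)
-- ===== Notes on version B (the rewrite author's own statement) =====
-- stated objective: faster
-- what changed: A rebuilds and measures a fresh table string for every candidate take (O(n) work per take, O(n^2) total); B makes one prefix-sum pass over the row line lengths, tests each candidate take with O(1) integer arithmetic while scanning the reversed prefix list, and renders the table only once for the winning take.
import Mathlib
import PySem

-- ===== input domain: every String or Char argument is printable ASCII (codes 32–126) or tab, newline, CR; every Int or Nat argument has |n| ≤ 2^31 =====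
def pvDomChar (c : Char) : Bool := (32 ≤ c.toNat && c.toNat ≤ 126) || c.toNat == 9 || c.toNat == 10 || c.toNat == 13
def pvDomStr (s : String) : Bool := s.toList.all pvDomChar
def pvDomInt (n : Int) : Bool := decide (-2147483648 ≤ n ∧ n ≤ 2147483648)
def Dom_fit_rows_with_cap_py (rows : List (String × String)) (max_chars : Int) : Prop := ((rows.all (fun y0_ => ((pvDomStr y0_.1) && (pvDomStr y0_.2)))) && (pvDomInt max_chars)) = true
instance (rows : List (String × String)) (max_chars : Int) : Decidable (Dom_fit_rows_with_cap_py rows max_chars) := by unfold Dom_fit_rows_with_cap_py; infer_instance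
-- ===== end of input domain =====

-- B replaces A's rebuild-and-measure loop (a fresh table string per candidate take) by one
-- prefix-sum pass over row line lengths, an O(1) arithmetic fit test per take, and a single
-- final render; the overflow fallback (shared verbatim by both Pythons) is a shared helper.

-- ===== shared helpers (identical code in Source A and Source B: _truncate_cell, _build_table, the fallback) =====
def pvHeader : List Char := "## Available Skills\n\n| Skill | Description |\n|-------|-------------|\n".toList

def pvTrunc (text : String) (max_len : Int) : List Char :=
  -- (text or '') is text itself for a str argument
  let one := PySem.Chars.strip (PySem.Chars.replace text.toList "\n".toList " ".toList)
  if (one.length : Int) ≤ max_len then one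
  else if max_len ≤ 3 then PySem.List.slice one none (some max_len)
  else PySem.List.slice one none (some (max_len - 3)) ++ "...".toList

def pvRow (r : String × String) : List Char :=
  "| ".toList ++ r.1.toList ++ " | ".toList ++ r.2.toList ++ " |".toList

def pvBuildTable (rows : List (String × String)) : List Char :=
  pvHeader ++ PySem.Chars.join "\n".toList (rows.map pvRow)

def pvFooter (omitted : Int) : List Char :=
  "\n\n...and ".toList ++ PySem.Int.toChars omitted ++ " more".toList

def pvTight (name desc : String) (max_chars : Int) : List Char → List Int → List Char
  | tight, [] => PySem.List.slice tight none (some max_chars)   -- tight[:max_chars] after the loop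
  | _, cap :: rest =>
      let t := pvBuildTable [(name, String.ofList (pvTrunc desc cap))]
      if (t.length : Int) ≤ max_chars then t else pvTight name desc max_chars t rest

-- both Pythons reach this code only with rows ≠ [] (the [] branch below is unreachable)
def pvFallback (rows : List (String × String)) (max_chars : Int) : String × Int :=
  let n : Int := rows.length
  let footer_only := "## Available Skills\n\n...and ".toList ++ PySem.Int.toChars n ++ " more".toList
  if (footer_only.length : Int) ≤ max_chars then (String.ofList footer_only, n)
  else
    match rows with
    | [] => ("", 0)
    | (name, desc) :: _ => (String.ofList (pvTight name desc max_chars [] [200, 80, 40, 20]), n - 1)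

-- ===== PORT A =====
-- 'for take in range(len(rows), 0, -1)' as the obvious countdown recursion; take = t+1
def pvLoopA (rows : List (String × String)) (max_chars : Int) : Nat → Option (String × Int)
  | 0 => none
  | t + 1 =>
      let chunk := PySem.List.slice rows none (some ((t : Int) + 1))
      let omitted : Int := (rows.length : Int) - ((t : Int) + 1)
      let footer := if omitted = 0 then [] else pvFooter omitted
      let candidate := pvBuildTable chunk ++ footer
      if (candidate.length : Int) ≤ max_chars then some (String.ofList candidate, omitted)
      else pvLoopA rows max_chars t

def fit_rows_with_cap_py (rows : List (String × String)) (max_chars : Int) : String × Int :=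
  if rows.isEmpty then ("", 0)
  else
    match pvLoopA rows max_chars rows.length with
    | some r => r
    | none => pvFallback rows max_chars

-- ===== PORT B =====
-- prefix-sum pass: acc starts at len(header) - 1, each row adds len(name)+len(desc)+8
def pvTableLens (rows : List (String × String)) : List Int :=
  (rows.foldl
    (fun (s : Int × List Int) r =>
      (s.1 + (r.1.length : Int) + (r.2.length : Int) + 8,
       s.2 ++ [s.1 + (r.1.length : Int) + (r.2.length : Int) + 8]))
    ((pvHeader.length : Int) - 1, [])).2

-- 'for tlen in reversed(table_lens)' with the running omitted counter
def pvScanB (rows : List (String × String)) (max_chars : Int) : Int → List Int → Option (String × Int)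
  | _, [] => none
  | omitted, tlen :: rest =>
      let extra : Int := if omitted = 0 then 0 else 14 + ((PySem.Int.toChars omitted).length : Int)
      if tlen + extra ≤ max_chars then
        let take : Int := (rows.length : Int) - omitted
        let footer := if omitted = 0 then [] else pvFooter omitted
        some (String.ofList (pvBuildTable (PySem.List.slice rows none (some take)) ++ footer), omitted)
      else pvScanB rows max_chars (omitted + 1) rest

def fit_rows_with_cap_py_alt (rows : List (String × String)) (max_chars : Int) : String × Int :=
  if rows.isEmpty then ("", 0)
  else
    match pvScanB rows max_chars 0 (pvTableLens rows).reverse with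
    | some r => r
    | none => pvFallback rows max_chars

-- ===== PRECONDITION & SPEC =====
def Spec_fit_rows_with_cap_py (rows : List (String × String)) (max_chars : Int) (out : String × Int) : Prop := out = fit_rows_with_cap_py_alt rows max_chars
instance (rows : List (String × String)) (max_chars : Int) (out : String × Int) : Decidable (Spec_fit_rows_with_cap_py rows max_chars out) := by unfold Spec_fit_rows_with_cap_py; infer_instance

-- ===== CLAIM (what is proved, stated in full; the proofs are below) =====
def Claim_equal_fit_rows_with_cap_py : Prop := ∀ (rows : List (String × String)) (max_chars : Int), Dom_fit_rows_with_cap_py rows max_chars → Spec_fit_rows_with_cap_py rows max_chars (fit_rows_with_cap_py rows max_chars)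

-- ===== LEMMAS AND PROOFS =====

-- proof-side abbreviation: the per-row contribution B's prefix-sum pass uses
def pvLineLen (p : String × String) : Int := (p.1.length : Int) + (p.2.length : Int) + 8

lemma pv_row_len (p : String × String) : (pvRow p).length = p.1.length + p.2.length + 7 := by
  simp [pvRow]; omega

-- join length: '\n'.join of 1+k lines has total line length plus k separators
lemma pv_join_len (sep : List Char) : ∀ (ls : List (List Char)) (a : List Char),
    (PySem.Chars.join sep (a :: ls)).length
      = a.length + (ls.map List.length).sum + sep.length * ls.length := by
  intro ls
  induction ls with
  | nil => intro a; simp [PySem.Chars.join_singleton]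
  | cons b rest ih =>
      intro a
      rw [PySem.Chars.join_cons_cons]
      simp only [List.length_append, ih b, List.map_cons, List.sum_cons, List.length_cons]
      ring

lemma pv_sum_lineLen (l : List (String × String)) :
    (l.map pvLineLen).sum = ((l.map (fun p => (pvRow p).length)).sum : Int) + l.length := by
  induction l with
  | nil => simp
  | cons x t ih =>
      simp only [List.map_cons, List.sum_cons, ih, pv_row_len, pvLineLen, List.length_cons]
      push_cast
      ring

lemma pv_table_len (l : List (String × String)) (h : l ≠ []) :
    ((pvBuildTable l).length : Int) = ((pvHeader.length : Int) - 1) + (l.map pvLineLen).sum := by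
  match l with
  | r :: rs =>
      simp only [pvBuildTable, List.length_append, List.map_cons, pv_join_len, List.map_map]
      rw [show (pvLineLen r :: List.map pvLineLen rs).sum = ((r :: rs).map pvLineLen).sum from rfl,
        pv_sum_lineLen]
      simp only [List.map_cons, List.sum_cons, List.length_cons, Function.comp_def, pv_row_len,
        List.length_map, show ("\n".toList).length = 1 from rfl, one_mul]
      push_cast
      omega

-- pvTableLens is a scan
def pvScanLens (acc : Int) : List (String × String) → List Int
  | [] => []
  | r :: rs => (acc + pvLineLen r) :: pvScanLens (acc + pvLineLen r) rs

lemma pv_tableLens_fold (l : List (String × String)) : ∀ (acc : Int) (pref : List Int),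
    (l.foldl
      (fun (s : Int × List Int) r =>
        (s.1 + (r.1.length : Int) + (r.2.length : Int) + 8,
         s.2 ++ [s.1 + (r.1.length : Int) + (r.2.length : Int) + 8]))
      (acc, pref)).2 = pref ++ pvScanLens acc l := by
  induction l with
  | nil => intro acc pref; simp [pvScanLens]
  | cons r rs ih =>
      intro acc pref
      simp only [List.foldl_cons]
      rw [ih]
      have harg : acc + (r.1.length : Int) + (r.2.length : Int) + 8 = acc + pvLineLen r := by
        unfold pvLineLen; ring
      rw [harg]
      simp [pvScanLens]

lemma pv_tableLens_eq (rows : List (String × String)) :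
    pvTableLens rows = pvScanLens ((pvHeader.length : Int) - 1) rows := by
  unfold pvTableLens
  rw [pv_tableLens_fold]
  simp

lemma pv_scanLens_length (l : List (String × String)) : ∀ (acc : Int),
    (pvScanLens acc l).length = l.length := by
  induction l with
  | nil => intro; rfl
  | cons r rs ih => intro acc; simp [pvScanLens, ih]

lemma pv_scanLens_get (l : List (String × String)) : ∀ (acc : Int) (t : Nat) (h : t < l.length),
    (pvScanLens acc l)[t]'(by rw [pv_scanLens_length]; exact h)
      = acc + ((l.take (t+1)).map pvLineLen).sum := by
  induction l with
  | nil => intro acc t h; simp at h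
  | cons r rs ih =>
      intro acc t h
      match t with
      | 0 => simp [pvScanLens]
      | t + 1 =>
          simp only [pvScanLens, List.getElem_cons_succ, List.take_succ_cons, List.map_cons, List.sum_cons]
          rw [ih (acc + pvLineLen r) t (by simpa using Nat.lt_of_succ_lt_succ h)]
          ring

lemma pv_footer_len (o : Int) : ((pvFooter o).length : Int) = 14 + ((PySem.Int.toChars o).length : Int) := by
  simp [pvFooter]
  omega

lemma pv_loop_eq (rows : List (String × String)) (mc : Int) : ∀ (t : Nat), t ≤ rows.length →
    pvLoopA rows mc t
      = pvScanB rows mc ((rows.length : Int) - t) ((pvTableLens rows).reverse.drop (rows.length - t)) := by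
  intro t
  induction t with
  | zero =>
      intro _
      rw [Nat.sub_zero, List.drop_of_length_le
        (by rw [List.length_reverse, pv_tableLens_eq, pv_scanLens_length])]
      rfl
  | succ t ih =>
      intro hle
      have hlen : (pvTableLens rows).length = rows.length := by
        rw [pv_tableLens_eq, pv_scanLens_length]
      have hn : rows.length - (t + 1) < (pvTableLens rows).reverse.length := by
        rw [List.length_reverse, hlen]; omega
      rw [List.drop_eq_getElem_cons hn]
      -- head of the dropped reverse = table_lens[t] = len(_build_table(rows[:t+1]))
      have hidx : (pvTableLens rows).reverse[rows.length - (t+1)]'hn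
          = ((pvHeader.length : Int) - 1) + ((rows.take (t+1)).map pvLineLen).sum := by
        rw [List.getElem_reverse, List.getElem_of_eq (pv_tableLens_eq rows)]
        rw [getElem_congr rfl (by rw [hlen]; omega : (pvTableLens rows).length - 1 - (rows.length - (t+1)) = t)
          (by rw [pv_scanLens_length]; omega)]
        exact pv_scanLens_get rows _ t (by omega)
      rw [hidx]
      have hcast : ((rows.length : Int) - ((t : Nat) + 1 : Nat)) = ((rows.length : Int) - ((t : Int) + 1)) := by
        push_cast; ring
      rw [hcast]
      have hchunk : PySem.List.slice rows none (some ((t : Int) + 1)) = rows.take (t + 1) := by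
        have h := PySem.List.slice_to_natCast (xs := rows) (b := t + 1)
        push_cast at h
        exact h
      have htake : (rows.length : Int) - ((rows.length : Int) - ((t : Int) + 1)) = (t : Int) + 1 := by ring
      have hne : rows.take (t + 1) ≠ [] := by
        have h1 : (rows.take (t + 1)).length = t + 1 := by rw [List.length_take]; omega
        intro hnil; rw [hnil] at h1; simp at h1
      have hdrop : rows.length - (t + 1) + 1 = rows.length - t := by omega
      have hnext : ((rows.length : Int) - ((t : Int) + 1)) + 1 = (rows.length : Int) - (t : Nat) := by
        ring
      simp only [pvLoopA, pvScanB, hchunk, htake, hdrop, hnext]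
      rw [← ih (by omega)]
      -- conditions: length of the built candidate vs. arithmetic length
      have hq : ∀ o : Int,
          ((pvBuildTable (rows.take (t + 1)) ++ (if o = 0 then [] else pvFooter o)).length : Int)
            = ((pvHeader.length : Int) - 1) + ((rows.take (t + 1)).map pvLineLen).sum
              + (if o = 0 then 0 else 14 + ((PySem.Int.toChars o).length : Int)) := by
        intro o
        rw [List.length_append]
        push_cast
        rw [pv_table_len _ hne]
        by_cases h0 : o = 0
        · simp [h0]
        · simp only [h0, if_false]
          simp [pv_footer_len]
      rw [hq]

-- ===== VERDICT (by name: the statement is the Claim_ definition above) =====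
theorem fit_rows_with_cap_py_spec : Claim_equal_fit_rows_with_cap_py := by
  intro rows mc _
  unfold Spec_fit_rows_with_cap_py fit_rows_with_cap_py fit_rows_with_cap_py_alt
  by_cases h : rows.isEmpty
  · simp [h]
  · simp only [h]
    rw [pv_loop_eq rows mc rows.length (le_refl _)]
    simp
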